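-- pv_equiv track=rewrite | github.com/bugnano/pysmsengine | pySmsEngine/outgoing_message.py | toBCDFormat
-- ===== SOURCE A (Python) =====
-- def toBCDFormat(s):
-- 	if (len(s) % 2) != 0:
-- 		s = s + "F"
-- 	bcd = []
-- 	for i in range(0, len(s), 2):
-- 		bcd.append(s[i+1])
-- 		bcd.append(s[i])
-- 	return "".join(bcd)
-- ===== SOURCE B (Python) =====
-- def toBCDFormat(s):
-- 	if (len(s) % 2) != 0:
-- 		s = s + "F"
-- 	return "".join(a + b for a, b in zip(s[1::2], s[0::2]))
-- ===== Notes on version B (the rewrite author's own statement) =====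
-- stated objective: idiomatic
-- what changed: Replaces the index loop over range(0,len,2) with list accumulator by two strided slices s[1::2]/s[0::2] interleaved via zip and a join.
import Mathlib
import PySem

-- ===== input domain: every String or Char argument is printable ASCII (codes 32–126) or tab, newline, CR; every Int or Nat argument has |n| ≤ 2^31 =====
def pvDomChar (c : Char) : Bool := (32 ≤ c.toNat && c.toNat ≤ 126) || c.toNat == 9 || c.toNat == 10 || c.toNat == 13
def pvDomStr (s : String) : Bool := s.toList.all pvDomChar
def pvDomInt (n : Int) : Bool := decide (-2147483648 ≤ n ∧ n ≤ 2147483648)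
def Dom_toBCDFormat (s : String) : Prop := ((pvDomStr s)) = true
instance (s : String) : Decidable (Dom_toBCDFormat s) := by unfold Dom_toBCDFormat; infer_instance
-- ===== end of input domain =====

-- B swaps each character pair via two strided slices interleaved with zip instead of A's index loop (idiomatic; same O(n) cost).

-- ===== PORT A =====
-- literal port: pad with 'F' on odd length, then for i in range(0, len, 2) append s[i+1], s[i].
-- (after padding the length is even, so both indices are always in range; the pyGetD default is never used)
def toBCDFormat (s : String) : String :=
  let cs0 := s.toList
  let cs := if cs0.length % 2 ≠ 0 then cs0 ++ ['F'] else cs0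
  let bcd := (PySem.List.pyRange 0 (cs.length : Int) 2).foldl
      (fun acc i => (acc ++ [PySem.List.pyGetD cs (i + 1) 'F']) ++ [PySem.List.pyGetD cs i 'F']) []
  String.mk bcd

-- ===== PORT B =====
-- pvEveryOther xs is the step-2 slice xs[0::2]; exact by hand since PySem.List.slice has no step.
def pvEveryOther : List Char → List Char
  | [] => []
  | [a] => [a]
  | a :: _ :: r => a :: pvEveryOther r

def toBCDFormat_alt (s : String) : String :=
  let cs0 := s.toList
  let cs := if cs0.length % 2 ≠ 0 then cs0 ++ ['F'] else cs0
  String.mk (((pvEveryOther cs.tail).zip (pvEveryOther cs)).flatMap (fun p => [p.1, p.2]))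

-- ===== PRECONDITION & SPEC =====
def Spec_toBCDFormat (s : String) (out : String) : Prop := out = toBCDFormat_alt s
instance (s : String) (out : String) : Decidable (Spec_toBCDFormat s out) := by unfold Spec_toBCDFormat; infer_instance

-- ===== CLAIM (what is proved, stated in full; the proofs are below) =====
def Claim_equal_toBCDFormat : Prop := ∀ (s : String), Dom_toBCDFormat s → Spec_toBCDFormat s (toBCDFormat s)

-- ===== LEMMAS AND PROOFS =====

-- the common value both programs compute on an even-length char list: adjacent pairs swapped
def pvSwapAdj : List Char → List Char
  | [] => []
  | [a] => [a]
  | a :: b :: r => b :: a :: pvSwapAdj r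

lemma pvEveryOther_cons_cons (a b : Char) (r : List Char) :
    pvEveryOther (a :: b :: r) = a :: pvEveryOther r := rfl

lemma pvEveryOther_tail_shift (b : Char) (r : List Char) :
    pvEveryOther (b :: r) = b :: pvEveryOther r.tail := by
  cases r <;> rfl

lemma pvB_eq_swapAdj : ∀ (cs : List Char), cs.length % 2 = 0 →
    ((pvEveryOther cs.tail).zip (pvEveryOther cs)).flatMap (fun p => [p.1, p.2]) = pvSwapAdj cs
  | [], _ => rfl
  | [a], h => by simp at h
  | a :: b :: r, h => by
      have hr : r.length % 2 = 0 := by simp [List.length] at h ⊢; omega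
      have ih := pvB_eq_swapAdj r hr
      simp only [List.tail_cons, pvEveryOther_cons_cons, pvEveryOther_tail_shift b r,
        List.zip_cons_cons, List.flatMap_cons, pvSwapAdj]
      simpa using ih

lemma pvA_fold : ∀ (k : ℕ) (cs : List Char), cs.length = 2 * k → ∀ (acc : List Char),
    (List.range k).foldl
      (fun (acc : List Char) (j : ℕ) => (acc ++ [PySem.List.pyGetD cs (0 + 2 * (j : ℤ) + 1) 'F'])
        ++ [PySem.List.pyGetD cs (0 + 2 * (j : ℤ)) 'F']) acc
    = acc ++ pvSwapAdj cs := by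
  intro k
  induction k with
  | zero =>
      intro cs h acc
      have : cs = [] := List.length_eq_zero_iff.mp (by omega)
      simp [this, pvSwapAdj]
  | succ k ih =>
      intro cs h acc
      match cs, h with
      | a :: b :: r, h =>
        have hr : r.length = 2 * k := by simp [List.length] at h; omega
        rw [List.range_succ_eq_map, List.foldl_cons, List.foldl_map]
        have h0 : PySem.List.pyGetD (a :: b :: r) (0 + 2 * ((0 : ℕ) : ℤ) + 1) 'F' = b := by
          norm_num [PySem.List.pyGetD]
        have h1 : PySem.List.pyGetD (a :: b :: r) (0 + 2 * ((0 : ℕ) : ℤ)) 'F' = a := by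
          norm_num [PySem.List.pyGetD]
        rw [h0, h1]
        have hfun : ∀ (acc' : List Char) (j : ℕ),
            ((acc' ++ [PySem.List.pyGetD (a :: b :: r) (0 + 2 * ((j + 1 : ℕ) : ℤ) + 1) 'F'])
              ++ [PySem.List.pyGetD (a :: b :: r) (0 + 2 * ((j + 1 : ℕ) : ℤ)) 'F'])
            = ((acc' ++ [PySem.List.pyGetD r (0 + 2 * (j : ℤ) + 1) 'F'])
              ++ [PySem.List.pyGetD r (0 + 2 * (j : ℤ)) 'F']) := by
          intro acc' j
          have e1 : (0 + 2 * ((j + 1 : ℕ) : ℤ) + 1) = (((2 * j + 3 : ℕ) : ℤ)) := by push_cast; ring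
          have e2 : (0 + 2 * ((j + 1 : ℕ) : ℤ)) = (((2 * j + 2 : ℕ) : ℤ)) := by push_cast; ring
          have e3 : (0 + 2 * (j : ℤ) + 1) = (((2 * j + 1 : ℕ) : ℤ)) := by push_cast; ring
          have e4 : (0 + 2 * (j : ℤ)) = (((2 * j : ℕ) : ℤ)) := by push_cast; ring
          rw [e1, e2, e3, e4, PySem.List.pyGetD_natCast, PySem.List.pyGetD_natCast,
            PySem.List.pyGetD_natCast, PySem.List.pyGetD_natCast]
          simp
        calc (List.range k).foldl _ (acc ++ [b] ++ [a])
            = (List.range k).foldl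
                (fun (acc' : List Char) (j : ℕ) => (acc' ++ [PySem.List.pyGetD r (0 + 2 * (j : ℤ) + 1) 'F'])
                  ++ [PySem.List.pyGetD r (0 + 2 * (j : ℤ)) 'F']) (acc ++ [b] ++ [a]) := by
                apply PySem.List.foldl_congr_mem
                intro acc' x _
                exact hfun acc' x
          _ = (acc ++ [b] ++ [a]) ++ pvSwapAdj r := ih r hr _
          _ = acc ++ pvSwapAdj (a :: b :: r) := by simp [pvSwapAdj]

-- ===== VERDICT (by name: the statement is the Claim_ definition above) =====
theorem toBCDFormat_spec : Claim_equal_toBCDFormat := by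
  intro s _
  unfold Spec_toBCDFormat toBCDFormat toBCDFormat_alt
  simp only []
  set cs0 := s.toList with hcs0
  set cs := if cs0.length % 2 ≠ 0 then cs0 ++ ['F'] else cs0 with hcs
  have heven : cs.length % 2 = 0 := by
    rw [hcs]; split
    · simp only [List.length_append, List.length_cons, List.length_nil]; omega
    · omega
  obtain ⟨k, hk⟩ : ∃ k, cs.length = 2 * k := ⟨cs.length / 2, by omega⟩
  have hcnt : (if (0 : ℤ) < (cs.length : ℤ) then (((cs.length : ℤ) - 0 + 2 - 1) / 2).toNat else 0) = k := by
    rw [hk]; push_cast; split <;> omega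
  have hcount : PySem.List.pyRange 0 (cs.length : Int) 2
      = (List.range k).map (fun (j : ℕ) => (0 : ℤ) + 2 * (j : ℤ)) := by
    rw [PySem.List.pyRange_of_pos 0 (cs.length : Int) (by norm_num), hcnt]
  rw [hcount, List.foldl_map, pvA_fold k cs hk [], pvB_eq_swapAdj cs heven]
  simp
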